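-- pv_equiv track=rewrite | github.com/Tarjeison/KebabOfCode | 2021/vetle/day8/8.py | get_top_left
-- ===== SOURCE A (Python) =====
-- def get_top_left(input_lines):
--     occurrences = {}
--     for element in input_lines:
--         for char in ['a','b','c','d','e','f','g']:
--             if char in occurrences:
--                 occurrences[char] += element.count(char)
--             else:
--                 occurrences[char] = element.count(char)
--     for element in occurrences:
--         if occurrences[element] == 6:
--             return element
-- ===== SOURCE B (Python) =====
-- def get_top_left(input_lines):
--     # Sort-then-run-scan: collect the a..g letters of all lines, sort them,
--     # and walk the sorted list run by run; the first run of length 6 names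
--     # the answer (sorted order = the a..g candidate order A checks).
--     chars = sorted(ch for line in input_lines for ch in line if 'a' <= ch <= 'g')
--     return _first_run_of_six(chars)
--
--
-- def _first_run_of_six(chars):
--     # at most 7 distinct letters can occur, so recursion depth is at most 8
--     if not chars:
--         return None
--     c = chars[0]
--     i = 1
--     while i < len(chars) and chars[i] == c:
--         i += 1
--     if i == 6:
--         return c
--     return _first_run_of_six(chars[i:])
-- ===== Notes on version B (the rewrite author's own statement) =====
-- stated objective: alternative
-- what changed: B collects the a-g letters of all lines, sorts them once, and scans the sorted list run by run, returning the head of the first run of length 6 (sorted order equals A's a-g candidate order); A instead tallies a dict with seven str.count scans per line and then walks the dict keys.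
import Mathlib
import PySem

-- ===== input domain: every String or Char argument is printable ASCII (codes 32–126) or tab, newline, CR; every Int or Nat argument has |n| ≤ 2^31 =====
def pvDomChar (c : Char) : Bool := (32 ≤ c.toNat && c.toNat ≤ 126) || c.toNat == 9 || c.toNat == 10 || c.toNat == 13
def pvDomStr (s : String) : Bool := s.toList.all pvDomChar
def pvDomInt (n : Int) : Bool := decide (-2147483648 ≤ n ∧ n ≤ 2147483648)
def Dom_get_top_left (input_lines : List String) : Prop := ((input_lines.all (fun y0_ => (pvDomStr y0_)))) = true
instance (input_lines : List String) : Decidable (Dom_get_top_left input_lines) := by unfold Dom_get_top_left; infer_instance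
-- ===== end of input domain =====

-- B replaces A's per-line, per-letter `element.count` tally by sorting the collected a..g
-- letters once and scanning the sorted list run by run (objective: alternative algorithm).

-- ===== PORT A =====
-- inner 'for char in ['a',...,'g']' loop of A, one line at a time
def pvStepA (d : PySem.Dict String Int) (element : String) : PySem.Dict String Int :=
  ["a", "b", "c", "d", "e", "f", "g"].foldl (fun d ch =>
    if d.contains ch then d.insert ch (d.getD ch 0 + (PySem.Str.count element ch : Int))
    else d.insert ch ((PySem.Str.count element ch : Int))) d

def get_top_left (input_lines : List String) : Option String :=
  let occurrences := input_lines.foldl pvStepA PySem.Dict.empty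
  -- 'for element in occurrences: if occurrences[element] == 6: return element' (falls through to None)
  occurrences.keys.find? (fun element => occurrences.getD element 0 == (6 : Int))

-- ===== PORT B =====
-- the filter `'a' <= ch <= 'g'` of Source B
def pvPredAG (c : Char) : Bool := decide ('a' ≤ c) && decide (c ≤ 'g')

-- Source B's `_first_run_of_six`: the inner `while` is the run `takeWhile`, `chars[i:]` the `dropWhile`
def pvRunScan : List Char → Option String
  | [] => none
  | c :: rest =>
    if (rest.takeWhile (fun x => x == c)).length + 1 == 6 then some (String.ofList [c])
    else pvRunScan (rest.dropWhile (fun x => x == c))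
termination_by l => l.length
decreasing_by
  simp only [List.length_cons]
  exact Nat.lt_succ_of_le (List.length_dropWhile_le _ _)

def get_top_left_alt (input_lines : List String) : Option String :=
  let chars := PySem.List.sorted
    (input_lines.flatMap (fun line => line.toList.filter pvPredAG)) (fun x => x) false
  pvRunScan chars

-- ===== PRECONDITION & SPEC =====
def Spec_get_top_left (input_lines : List String) (out : Option String) : Prop := out = get_top_left_alt input_lines
instance (input_lines : List String) (out : Option String) : Decidable (Spec_get_top_left input_lines out) := by unfold Spec_get_top_left; infer_instance

-- ===== CLAIM (what is proved, stated in full; the proofs are below) =====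
def Claim_equal_get_top_left : Prop := ∀ (input_lines : List String), Dom_get_top_left input_lines → Spec_get_top_left input_lines (get_top_left input_lines)

-- ===== LEMMAS AND PROOFS =====

-- ---- A-side characterisation: the dict after the double loop ----
def pvMkD (f : String → Int) : PySem.Dict String Int :=
  PySem.Dict.mk [("a", f "a"), ("b", f "b"), ("c", f "c"), ("d", f "d"),
                 ("e", f "e"), ("f", f "f"), ("g", f "g")]

def pvSumA (lines : List String) (k : String) : Int :=
  (lines.map (fun l => (PySem.Str.count l k : Int))).sum

def pvSumB (lines : List String) (c : Char) : Int :=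
  (lines.map (fun l => (l.toList.count c : Int))).sum

theorem pvStepA_empty (e : String) :
    pvStepA PySem.Dict.empty e = pvMkD (fun k => (PySem.Str.count e k : Int)) := rfl

set_option maxHeartbeats 2000000 in
theorem pvStepA_mkD (f : String → Int) (e : String) :
    pvStepA (pvMkD f) e = pvMkD (fun k => f k + (PySem.Str.count e k : Int)) := by
  simp [pvStepA, pvMkD, List.foldl, PySem.Dict.insert, PySem.Dict.contains, PySem.Dict.getD,
    PySem.Dict.get?]

theorem pvMkD_congr {f g : String → Int} (h : ∀ k, f k = g k) : pvMkD f = pvMkD g := by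
  simp [pvMkD, h]

theorem pvFoldA_mkD (ls : List String) (f : String → Int) :
    ls.foldl pvStepA (pvMkD f) = pvMkD (fun k => f k + pvSumA ls k) := by
  induction ls generalizing f with
  | nil => exact pvMkD_congr (by simp [pvSumA])
  | cons l ls ih =>
    rw [List.foldl_cons, pvStepA_mkD, ih]
    exact pvMkD_congr (fun k => by simp [pvSumA]; ring)

theorem pvFoldA_cons (l : String) (ls : List String) :
    (l :: ls).foldl pvStepA PySem.Dict.empty = pvMkD (fun k => pvSumA (l :: ls) k) := by
  rw [List.foldl_cons, pvStepA_empty, pvFoldA_mkD]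
  exact pvMkD_congr (fun k => by simp [pvSumA])

-- Chars.count with a one-character needle is List.count
theorem pvCountGo_singleton (c : Char) (l : List Char) (fuel : Nat) (acc : Nat)
    (h : l.length ≤ fuel) :
    PySem.Chars.count.go [c] fuel l acc = acc + l.count c := by
  induction l generalizing fuel acc with
  | nil => cases fuel <;> simp [PySem.Chars.count.go]
  | cons x t ih =>
    cases fuel with
    | zero => simp at h
    | succ fuel =>
      simp only [List.length_cons, Nat.add_le_add_iff_right] at h
      by_cases hc : c = x
      · subst hc
        simp [PySem.Chars.count.go, List.isPrefixOf, ih _ _ h]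
        omega
      · simp [PySem.Chars.count.go, List.isPrefixOf, hc, ih _ _ h,
          Ne.symm hc]

theorem pvCharsCount_singleton (l : List Char) (c : Char) :
    PySem.Chars.count l [c] = l.count c := by
  simpa [PySem.Chars.count] using pvCountGo_singleton c l l.length 0 le_rfl

theorem pvSumA_mk (lines : List String) (c : Char) :
    pvSumA lines (String.ofList [c]) = pvSumB lines c := by
  simp only [pvSumA, pvSumB]
  congr 1
  refine List.map_congr_left (fun l _ => ?_)
  have : PySem.Str.count l (String.ofList [c]) = l.toList.count c := by
    rw [PySem.Str.count_eq]
    have : (String.ofList [c]).toList = [c] := by simp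
    rw [this, pvCharsCount_singleton]
  rw [this]

theorem pvFind?_congr {α : Type} {p q : α → Bool} :
    ∀ l : List α, (∀ a ∈ l, p a = q a) → l.find? p = l.find? q := by
  intro l h
  induction l with
  | nil => rfl
  | cons x t ih =>
    simp only [List.find?, h x (by simp)]
    cases q x <;> simp [ih (fun a ha => h a (by simp [ha]))]

theorem pvFindMatch (F : String → Int) (G : Char → Int)
    (h : ∀ c, F (String.ofList [c]) = G c) :
    (["a", "b", "c", "d", "e", "f", "g"] : List String).find? (fun s => F s == (6 : Int))
      = ((['a', 'b', 'c', 'd', 'e', 'f', 'g'] : List Char).find? (fun c => G c == (6 : Int))).map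
          (fun c => String.ofList [c]) := by
  have hl : (["a", "b", "c", "d", "e", "f", "g"] : List String)
      = ['a', 'b', 'c', 'd', 'e', 'f', 'g'].map (fun c => String.ofList [c]) := by decide
  rw [hl, List.find?_map]
  have hp : ((fun s => F s == (6 : Int)) ∘ (fun c => String.ofList [c]))
      = fun c => G c == (6 : Int) := by funext c; simp [h]
  rw [hp]

-- ---- B-side: run scan of a sorted list = ordered lookup of the count table ----

theorem pvDropGt (c : Char) (t : List Char) (hp : t.Pairwise (· ≤ ·))
    (hge : ∀ y ∈ t, c ≤ y) :
    ∀ x ∈ t.dropWhile (fun x => x == c), c < x := by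
  induction t with
  | nil => simp
  | cons a t ih =>
    rw [List.pairwise_cons] at hp
    by_cases ha : a = c
    · subst ha
      simp only [List.dropWhile_cons, beq_self_eq_true, if_pos]
      exact ih hp.2 (fun y hy => hge y (by simp [hy]))
    · have hca : c < a :=
        lt_of_le_of_ne (hge a (by simp)) (Ne.symm ha)
      simp only [List.dropWhile_cons, beq_iff_eq, ha, ite_false]
      intro x hx
      rcases List.mem_cons.mp hx with rfl | hx
      · exact hca
      · exact lt_of_lt_of_le hca (hp.1 x hx)

theorem pvCountRun (c : Char) (t : List Char) (hp : (c :: t).Pairwise (· ≤ ·)) :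
    (c :: t).count c = (t.takeWhile (fun x => x == c)).length + 1 := by
  rw [List.pairwise_cons] at hp
  have hsplit : t = t.takeWhile (fun x => x == c) ++ t.dropWhile (fun x => x == c) :=
    (List.takeWhile_append_dropWhile).symm
  have h1 : (t.takeWhile (fun x => x == c)).count c
      = (t.takeWhile (fun x => x == c)).length := by
    rw [List.count_eq_length]
    intro b hb
    have hb' := List.mem_takeWhile_imp hb
    exact (beq_iff_eq.mp hb').symm
  have h2 : (t.dropWhile (fun x => x == c)).count c = 0 := by
    rw [List.count_eq_zero]
    intro hmem
    exact absurd (pvDropGt c t hp.2 hp.1 c hmem) (lt_irrefl c)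
  calc (c :: t).count c = t.count c + 1 := by simp
    _ = (t.takeWhile (fun x => x == c)).length + 1 := by
        conv_lhs => rw [hsplit]
        rw [List.count_append, h1, h2]

theorem pvCountOther (c x : Char) (t : List Char) (hx : x ≠ c) :
    (c :: t).count x = (t.dropWhile (fun x => x == c)).count x := by
  have hsplit : t = t.takeWhile (fun x => x == c) ++ t.dropWhile (fun x => x == c) :=
    (List.takeWhile_append_dropWhile).symm
  have h1 : (t.takeWhile (fun x => x == c)).count x = 0 := by
    rw [List.count_eq_zero]
    intro hmem
    have := List.mem_takeWhile_imp hmem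
    exact hx (by simpa using this)
  have hf : (x == c) = false := beq_eq_false_iff_ne.mpr hx
  calc (c :: t).count x = t.count x := by simp [Ne.symm hx]
    _ = _ := by conv_lhs => rw [hsplit]
                rw [List.count_append, h1]; omega

theorem pvScanEq : ∀ (cands : List Char), cands.Pairwise (· < ·) →
    ∀ (S : List Char), S.Pairwise (· ≤ ·) → (∀ x ∈ S, x ∈ cands) →
    pvRunScan S = (cands.find? (fun c => S.count c == 6)).map (fun c => String.ofList [c]) := by
  intro cands
  induction cands with
  | nil =>
    intro _ S _ hmem
    cases S with
    | nil => simp [pvRunScan]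
    | cons h t => exact absurd (hmem h (by simp)) (by simp)
  | cons c cs ih =>
    intro hc S hS hmem
    rw [List.pairwise_cons] at hc
    cases S with
    | nil => simp [pvRunScan]
    | cons h t =>
      by_cases hhc : h = c
      · subst hhc
        have hcount := pvCountRun h t hS
        rw [List.pairwise_cons] at hS
        by_cases h6 : (t.takeWhile (fun x => x == h)).length + 1 = 6
        · rw [pvRunScan, if_pos (by simpa using h6), List.find?_cons_of_pos (by
            simp [hcount, h6])]
          rfl
        · rw [pvRunScan, if_neg (by simpa using h6), List.find?_cons_of_neg (by
            simp [hcount]; omega)]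
          have hS' : (t.dropWhile (fun x => x == h)).Pairwise (· ≤ ·) :=
            hS.2.sublist (List.dropWhile_sublist _)
          have hgt := pvDropGt h t hS.2 hS.1
          have hmem' : ∀ x ∈ t.dropWhile (fun x => x == h), x ∈ cs := by
            intro x hx
            have hxc : x ∈ h :: cs :=
              hmem x (List.mem_cons_of_mem _ ((List.dropWhile_sublist _).subset hx))
            rcases List.mem_cons.mp hxc with rfl | h' 
            · exact absurd (hgt x hx) (lt_irrefl x)
            · exact h'
          rw [ih hc.2 _ hS' hmem']
          congr 1
          refine pvFind?_congr cs (fun a ha => ?_)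
          have hane : a ≠ h := fun he => absurd (hc.1 a ha) (by simp [he])
          rw [pvCountOther h a t hane]
      · -- head of S is a later candidate: c does not occur in S at all
        have hhin : h ∈ cs := by
          rcases List.mem_cons.mp (hmem h (by simp)) with rfl | h' 
          · exact absurd rfl hhc
          · exact h'
        have hch : c < h := hc.1 h hhin
        rw [List.pairwise_cons] at hS
        have hgtc : ∀ x ∈ h :: t, c < x := by
          intro x hx
          rcases List.mem_cons.mp hx with rfl | hx
          · exact hch
          · exact lt_of_lt_of_le hch (hS.1 x hx)
        have hzero : (h :: t).count c = 0 := by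
          rw [List.count_eq_zero]
          intro hcm
          exact absurd (hgtc c hcm) (lt_irrefl c)
        rw [List.find?_cons_of_neg (by simp [hzero])]
        have hmem' : ∀ x ∈ h :: t, x ∈ cs := by
          intro x hx
          rcases List.mem_cons.mp (hmem x hx) with rfl | h' 
          · exact absurd (hgtc x hx) (lt_irrefl x)
          · exact h'
        exact ih hc.2 _ (by rw [List.pairwise_cons]; exact hS) hmem'

theorem pvMemCands (x : Char) (h1 : 'a' ≤ x) (h2 : x ≤ 'g') :
    x ∈ (['a', 'b', 'c', 'd', 'e', 'f', 'g'] : List Char) := by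
  have h1' : 97 ≤ x.toNat := h1
  have h2' : x.toNat ≤ 103 := h2
  have hx : x = Char.ofNat x.toNat := (Char.ofNat_toNat x).symm
  interval_cases h : x.toNat <;> rw [hx] <;> decide

theorem pvSumB_eq (lines : List String) (c : Char) (hc : pvPredAG c = true) :
    pvSumB lines c = ((lines.flatMap (fun l => l.toList.filter pvPredAG)).count c : Int) := by
  induction lines with
  | nil => simp [pvSumB]
  | cons l ls ih =>
    have hcf : (l.toList.filter pvPredAG).count c = l.toList.count c := by
      rw [List.count_filter (by simpa using hc)]
    simp only [pvSumB, List.map_cons, List.sum_cons, List.flatMap_cons, List.count_append, hcf]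
    rw [show ((ls.map (fun l => (l.toList.count c : Int))).sum) = pvSumB ls c from rfl, ih]
    push_cast
    ring

-- ===== VERDICT (by name: the statement is the Claim_ definition above) =====
theorem get_top_left_spec : Claim_equal_get_top_left := by
  intro input_lines _
  unfold Spec_get_top_left
  cases input_lines with
  | nil => simp [get_top_left, get_top_left_alt, pvRunScan, PySem.Dict.keys,
      PySem.Dict.empty, PySem.List.sorted]
  | cons l ls =>
    show ((l :: ls).foldl pvStepA PySem.Dict.empty).keys.find?
        (fun element => ((l :: ls).foldl pvStepA PySem.Dict.empty).getD element 0 == (6 : Int))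
      = _
    rw [pvFoldA_cons]
    unfold get_top_left_alt
    set L := (l :: ls).flatMap (fun line => line.toList.filter pvPredAG) with hL
    set S := PySem.List.sorted L (fun x => x) false with hS
    have hSp : S.Pairwise (· ≤ ·) := by
      simpa using PySem.List.sorted_pairwise (xs := L) (key := fun x => x)
    have hcount : ∀ c : Char, S.count c = L.count c :=
      fun c => (PySem.List.sorted_perm (xs := L) (key := fun x => x) (rev := false)).count_eq c
    have hmemS : ∀ x ∈ S, x ∈ (['a', 'b', 'c', 'd', 'e', 'f', 'g'] : List Char) := by
      intro x hx
      have hxL : x ∈ L := (PySem.List.mem_sorted _ _ _ _).mp hx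
      have hpred : pvPredAG x = true := by
        rw [hL] at hxL
        rcases List.mem_flatMap.mp hxL with ⟨line, _, hfx⟩
        exact (List.mem_filter.mp hfx).2
      simp only [pvPredAG, Bool.and_eq_true, decide_eq_true_eq] at hpred
      exact pvMemCands x hpred.1 hpred.2
    have hB := pvScanEq ['a', 'b', 'c', 'd', 'e', 'f', 'g'] (by decide) S hSp hmemS
    have hkeys : (pvMkD (fun k => pvSumA (l :: ls) k)).keys
        = (["a", "b", "c", "d", "e", "f", "g"] : List String) := rfl
    have hgetD : ∀ s ∈ (["a", "b", "c", "d", "e", "f", "g"] : List String),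
        ((pvMkD (fun k => pvSumA (l :: ls) k)).getD s 0 == (6 : Int))
          = (pvSumA (l :: ls) s == (6 : Int)) := by
      intro s hs
      fin_cases hs <;> rfl
    rw [hkeys, pvFind?_congr _ hgetD,
      pvFindMatch _ _ (fun c => pvSumA_mk (l :: ls) c)]
    show _ = pvRunScan S
    rw [hB]
    congr 1
    refine pvFind?_congr _ (fun c hc => ?_)
    have hpred : pvPredAG c = true := by fin_cases hc <;> decide
    rw [pvSumB_eq (l :: ls) c hpred, ← hL, hcount c]
    have hcast : ((L.count c : Int) = (6 : Int)) ↔ L.count c = 6 := by exact_mod_cast Iff.rfl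
    rcases eq_or_ne (L.count c) 6 with h6 | h6 <;> simp [h6, hcast]
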